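-- pv_equiv track=rewrite | github.com/muneebaifrah/Unstop-100-Days-Coding-Sprint | Day-73/4.Choose.py | can_construct_sequence
-- ===== SOURCE A (Python) =====
-- def can_construct_sequence(N, K, A, B):
--     dpA = [False] * N
--     dpB = [False] * N
--
--     # Base case: we can pick either at position 0
--     dpA[0] = True
--     dpB[0] = True
--
--     for i in range(1, N):
--         dpA[i] = (
--             (dpA[i-1] and abs(A[i] - A[i-1]) <= K) or
--             (dpB[i-1] and abs(A[i] - B[i-1]) <= K)
--         )
--
--         dpB[i] = (
--             (dpA[i-1] and abs(B[i] - A[i-1]) <= K) or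
--             (dpB[i-1] and abs(B[i] - B[i-1]) <= K)
--         )
--
--     return "Yes" if dpA[-1] or dpB[-1] else "No"
-- ===== SOURCE B (Python) =====
-- def can_construct_sequence(N, K, A, B):
--     # Map each consecutive step to a 2x2 boolean transition matrix and reduce
--     # them with boolean matrix multiplication; answer from the product matrix.
--     pairs = [(A[i], B[i]) for i in range(N)]
--     mats = [(abs(ca - pa) <= K, abs(cb - pa) <= K,
--              abs(ca - pb) <= K, abs(cb - pb) <= K)
--             for (pa, pb), (ca, cb) in zip(pairs, pairs[1:])]
--     prod = (True, False, False, True)  # identity matrix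
--     for m in mats:
--         prod = (prod[0] and m[0] or prod[1] and m[2],
--                 prod[0] and m[1] or prod[1] and m[3],
--                 prod[2] and m[0] or prod[3] and m[2],
--                 prod[2] and m[1] or prod[3] and m[3])
--     # initial row vector is (True, True), so reachable iff any entry is true
--     return "Yes" if any(prod) else "No"
-- ===== Notes on version B (the rewrite author's own statement) =====
-- stated objective: alternative
-- what changed: Instead of filling two boolean DP arrays in place, B maps each consecutive position pair to a 2x2 boolean transition matrix and reduces the matrix list by boolean matrix multiplication; the answer is read off the product matrix (initial vector is all-true, so 'Yes' iff any entry is true).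
-- outside the precondition, e.g. on can_construct_sequence(1, 0, [], [5]): A returns 'Yes', B raises IndexError; on can_construct_sequence(3, -1, [0, 5, 9], [0, 5]): A returns 'No', B raises IndexError
import Mathlib
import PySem

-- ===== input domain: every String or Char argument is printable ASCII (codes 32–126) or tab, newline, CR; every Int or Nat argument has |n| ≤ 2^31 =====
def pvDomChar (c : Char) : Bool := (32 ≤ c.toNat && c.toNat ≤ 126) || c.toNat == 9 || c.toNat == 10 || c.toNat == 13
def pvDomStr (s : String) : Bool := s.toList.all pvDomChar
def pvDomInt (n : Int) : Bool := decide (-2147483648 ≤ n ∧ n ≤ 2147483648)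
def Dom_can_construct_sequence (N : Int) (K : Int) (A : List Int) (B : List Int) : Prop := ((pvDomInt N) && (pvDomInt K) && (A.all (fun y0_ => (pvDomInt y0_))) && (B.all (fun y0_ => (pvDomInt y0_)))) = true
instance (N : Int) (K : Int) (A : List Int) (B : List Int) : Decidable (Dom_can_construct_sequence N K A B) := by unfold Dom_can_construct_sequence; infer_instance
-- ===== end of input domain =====

-- B replaces A's in-place boolean DP arrays by a map-reduce: one 2x2 boolean transition matrix per
-- consecutive pair, reduced by boolean matrix multiplication (alternative decomposition).

-- ===== PORT A =====
-- loop body of A's 'for i in range(1, N)' (dpB[i] reads dpA[i-1], untouched by the write at index i)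
def pvStepA (K : Int) (A B : List Int) (st : List Bool × List Bool) (i : Int) : List Bool × List Bool :=
  let dA := PySem.List.pyGetD st.1 (i-1) false
  let dB := PySem.List.pyGetD st.2 (i-1) false
  let ai := PySem.List.pyGetD A i 0
  let bi := PySem.List.pyGetD B i 0
  let a1 := PySem.List.pyGetD A (i-1) 0
  let b1 := PySem.List.pyGetD B (i-1) 0
  (PySem.List.pySetD st.1 i ((dA && decide (|ai - a1| ≤ K)) || (dB && decide (|ai - b1| ≤ K))),
   PySem.List.pySetD st.2 i ((dA && decide (|bi - a1| ≤ K)) || (dB && decide (|bi - b1| ≤ K))))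

def can_construct_sequence (N : Int) (K : Int) (A : List Int) (B : List Int) : String :=
  let dpA := PySem.List.pySetD (List.replicate N.toNat false) 0 true
  let dpB := PySem.List.pySetD (List.replicate N.toNat false) 0 true
  let st := (PySem.List.pyRange 1 N 1).foldl (pvStepA K A B) (dpA, dpB)
  if PySem.List.pyGetD st.1 (-1) false || PySem.List.pyGetD st.2 (-1) false then "Yes" else "No"

-- ===== PORT B =====
-- 2x2 boolean matrix multiply, entries (aa, ab, ba, bb): literal port of B's 'prod' update
def pvBMul (p m : Bool × Bool × Bool × Bool) : Bool × Bool × Bool × Bool :=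
  (p.1 && m.1 || p.2.1 && m.2.2.1,
   p.1 && m.2.1 || p.2.1 && m.2.2.2,
   p.2.2.1 && m.1 || p.2.2.2 && m.2.2.1,
   p.2.2.1 && m.2.1 || p.2.2.2 && m.2.2.2)

def can_construct_sequence_alt (N : Int) (K : Int) (A : List Int) (B : List Int) : String :=
  let pairs := (PySem.List.pyRange 0 N 1).map
    (fun i => (PySem.List.pyGetD A i 0, PySem.List.pyGetD B i 0))
  let mats := (List.zip pairs (PySem.List.slice pairs (some 1) none)).map
    (fun pc => (decide (|pc.2.1 - pc.1.1| ≤ K), decide (|pc.2.2 - pc.1.1| ≤ K),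
                decide (|pc.2.1 - pc.1.2| ≤ K), decide (|pc.2.2 - pc.1.2| ≤ K)))
  let prod := mats.foldl pvBMul (true, false, false, true)
  if prod.1 || prod.2.1 || prod.2.2.1 || prod.2.2.2 then "Yes" else "No"

-- ===== PRECONDITION & SPEC =====
-- Pre_ requires 1 ≤ N and both lists to have at least N elements; outside it A usually raises
-- (dpA[0] on N < 1, A[i]/B[i] on short lists), but in two accidental corners A still returns while
-- B — which materializes all N pairs (A[i], B[i]) up front — raises IndexError: N == 1 with an
-- empty list (A returns "Yes" without touching the lists) and short lists on which both DP flags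
-- die before the first out-of-range access, which A's short-circuit turns into "No".
def Pre_can_construct_sequence (N : Int) (K : Int) (A : List Int) (B : List Int) : Prop :=
  1 ≤ N ∧ N ≤ (A.length : Int) ∧ N ≤ (B.length : Int)
instance (N : Int) (K : Int) (A : List Int) (B : List Int) : Decidable (Pre_can_construct_sequence N K A B) := by unfold Pre_can_construct_sequence; infer_instance

def pvWitness_can_construct_sequence : Int × Int × List Int × List Int := (2, 1, [0, 1], [5, 6])

def Spec_can_construct_sequence (N : Int) (K : Int) (A : List Int) (B : List Int) (out : String) : Prop := out = can_construct_sequence_alt N K A B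
instance (N : Int) (K : Int) (A : List Int) (B : List Int) (out : String) : Decidable (Spec_can_construct_sequence N K A B out) := by unfold Spec_can_construct_sequence; infer_instance

-- ===== CLAIM (what is proved, stated in full; the proofs are below) =====
def Claim_equal_can_construct_sequence : Prop := ∀ (N : Int) (K : Int) (A : List Int) (B : List Int), Dom_can_construct_sequence N K A B → Pre_can_construct_sequence N K A B → Spec_can_construct_sequence N K A B (can_construct_sequence N K A B)

-- ===== LEMMAS AND PROOFS =====

-- proof-side name for the transition matrix B builds for the step at position i
def pvT (K : Int) (A B : List Int) (i : Int) : Bool × Bool × Bool × Bool :=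
  (decide (|PySem.List.pyGetD A i 0 - PySem.List.pyGetD A (i-1) 0| ≤ K),
   decide (|PySem.List.pyGetD B i 0 - PySem.List.pyGetD A (i-1) 0| ≤ K),
   decide (|PySem.List.pyGetD A i 0 - PySem.List.pyGetD B (i-1) 0| ≤ K),
   decide (|PySem.List.pyGetD B i 0 - PySem.List.pyGetD B (i-1) 0| ≤ K))

-- B's list of matrices is exactly the step matrices for i = 1 .. N-1
lemma pvMatsEq (N K : Int) (A B : List Int) :
    (List.zip ((PySem.List.pyRange 0 N 1).map
        (fun i => (PySem.List.pyGetD A i 0, PySem.List.pyGetD B i 0)))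
      (PySem.List.slice ((PySem.List.pyRange 0 N 1).map
        (fun i => (PySem.List.pyGetD A i 0, PySem.List.pyGetD B i 0))) (some 1) none)).map
      (fun pc => (decide (|pc.2.1 - pc.1.1| ≤ K), decide (|pc.2.2 - pc.1.1| ≤ K),
                  decide (|pc.2.1 - pc.1.2| ≤ K), decide (|pc.2.2 - pc.1.2| ≤ K)))
    = (PySem.List.pyRange 1 N 1).map (pvT K A B) := by
  rw [PySem.List.slice_from_one]
  apply List.ext_getElem
  · simp [PySem.List.length_pyRange_one]
  · intro j h1 h2
    simp only [List.getElem_map, List.getElem_zip, List.getElem_tail,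
      PySem.List.getElem_pyRange_one, pvT]
    have e1 : (0:Int) + ((j:Nat)+1 : Nat) = 1 + (j:Int) := by push_cast; ring
    have e2 : (1:Int) + (j:Int) - 1 = (0:Int) + (j:Int) := by ring
    rw [e1, e2]

-- boolean distributivity used to fold one more matrix into the product
lemma pvOrDistrib (a b c d x y : Bool) :
    ((a && x || b && y) || (c && x || d && y)) = ((a || c) && x || (b || d) && y) := by
  cases a <;> cases b <;> cases c <;> cases d <;> cases x <;> cases y <;> rfl

-- Loop invariant: after the first m steps A's DP arrays keep length N, and the flags at position m
-- are the column sums (initial row vector all-true) of B's matrix product over the same steps.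
lemma pvInv (N K : Int) (A B : List Int) (m : Nat) (hm : m + 1 ≤ N.toNat) :
    let st := (PySem.List.pyRange 1 (1 + (m : Int)) 1).foldl (pvStepA K A B)
      (PySem.List.pySetD (List.replicate N.toNat false) 0 true,
       PySem.List.pySetD (List.replicate N.toNat false) 0 true)
    let P := ((PySem.List.pyRange 1 (1 + (m : Int)) 1).map (pvT K A B)).foldl pvBMul
      (true, false, false, true)
    st.1.length = N.toNat ∧ st.2.length = N.toNat ∧
    st.1.getD m false = (P.1 || P.2.2.1) ∧ st.2.getD m false = (P.2.1 || P.2.2.2) := by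
  induction m with
  | zero =>
    simp only []
    rw [show ((1:Int) + (0:Nat) = 1) by norm_num, PySem.List.pyRange_one_eq_nil le_rfl]
    simp only [List.map_nil, List.foldl_nil]
    have h1 : 0 < N.toNat := by omega
    refine ⟨by simp [PySem.List.pySetD_of_nonneg], by simp [PySem.List.pySetD_of_nonneg], ?_, ?_⟩ <;>
      simp [PySem.List.pySetD_of_nonneg, List.getD, h1]
  | succ m ih =>
    have hm' : m + 1 ≤ N.toNat := by omega
    obtain ⟨hl1, hl2, hd1, hd2⟩ := ih hm'
    have hsplit : PySem.List.pyRange 1 (1 + ((m+1 : Nat) : Int)) 1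
        = PySem.List.pyRange 1 (1 + (m:Int)) 1 ++ [1 + (m:Int)] := by
      have h : (1 + ((m+1:Nat):Int)) = (1 + (m:Int)) + 1 := by push_cast; ring
      rw [h, PySem.List.pyRange_one_succ_right (by omega)]
    simp only [hsplit, List.map_append, List.foldl_append, List.map_cons, List.map_nil,
      List.foldl_cons, List.foldl_nil]
    set st := (PySem.List.pyRange 1 (1 + (m : Int)) 1).foldl (pvStepA K A B)
      (PySem.List.pySetD (List.replicate N.toNat false) 0 true,
       PySem.List.pySetD (List.replicate N.toNat false) 0 true) with hst
    set P := ((PySem.List.pyRange 1 (1 + (m : Int)) 1).map (pvT K A B)).foldl pvBMul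
      (true, false, false, true) with hP
    have hidx : (1 : Int) + (m:Int) - 1 = ((m:Nat) : Int) := by ring
    have hidx2 : (1 : Int) + (m:Int) = (((m+1:Nat)) : Int) := by push_cast; ring
    have hset1 : PySem.List.pySetD st.1 ((1:Int) + (m:Int)) = st.1.set (m+1) := by
      funext x; rw [hidx2]; simpa using PySem.List.pySetD_natCast st.1 (m+1) x
    have hset2 : PySem.List.pySetD st.2 ((1:Int) + (m:Int)) = st.2.set (m+1) := by
      funext x; rw [hidx2]; simpa using PySem.List.pySetD_natCast st.2 (m+1) x
    have hlt1 : m + 1 < st.1.length := by omega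
    have hlt2 : m + 1 < st.2.length := by omega
    refine ⟨by simp [pvStepA, hset1, hl1], by simp [pvStepA, hset2, hl2], ?_, ?_⟩ <;>
    · simp only [pvStepA, pvBMul, pvT, hidx, hset1, hset2]
      simp only [List.getD] at hd1 hd2
      simp [List.getD, hlt1, hlt2, hd1, hd2]
      rw [pvOrDistrib]

-- ===== VERDICT (by name: the statement is the Claim_ definition above) =====
theorem can_construct_sequence_spec : Claim_equal_can_construct_sequence := by
  intro N K A B _ hPre
  obtain ⟨hN, hA, hB⟩ := hPre
  unfold Spec_can_construct_sequence
  set m := N.toNat - 1 with hm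
  have hNm : N = 1 + (m : Int) := by omega
  obtain ⟨hl1, hl2, hd1, hd2⟩ := pvInv N K A B m (by omega)
  simp only [can_construct_sequence, can_construct_sequence_alt]
  rw [pvMatsEq N K A B]
  rw [show PySem.List.pyRange 1 N 1 = PySem.List.pyRange 1 (1 + (m:Int)) 1 by rw [← hNm]]
  set st := (PySem.List.pyRange 1 (1 + (m : Int)) 1).foldl (pvStepA K A B)
    (PySem.List.pySetD (List.replicate N.toNat false) 0 true,
     PySem.List.pySetD (List.replicate N.toNat false) 0 true) with hst
  set P := ((PySem.List.pyRange 1 (1 + (m : Int)) 1).map (pvT K A B)).foldl pvBMul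
    (true, false, false, true) with hP
  clear_value st P
  clear hst hP
  have hml1 : m < st.1.length := by omega
  have hne1 : st.1 ≠ [] := by intro h; rw [h] at hml1; simp at hml1
  have hml2 : m < st.2.length := by omega
  have hne2 : st.2 ≠ [] := by intro h; rw [h] at hml2; simp at hml2
  have hneg1 : PySem.List.pyGetD st.1 (-1) false = st.1.getD m false := by
    rw [PySem.List.pyGetD_neg_one st.1 false hne1, List.getLast_eq_getElem,
        List.getD_eq_getElem st.1 false (by omega : m < st.1.length)]
    congr 1
    omega
  have hneg2 : PySem.List.pyGetD st.2 (-1) false = st.2.getD m false := by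
    rw [PySem.List.pyGetD_neg_one st.2 false hne2, List.getLast_eq_getElem,
        List.getD_eq_getElem st.2 false (by omega : m < st.2.length)]
    congr 1
    omega
  rw [hneg1, hneg2, hd1, hd2]
  have hcomm : ∀ a b c d : Bool, ((a || c) || (b || d)) = (a || b || c || d) := by
    intro a b c d; cases a <;> cases b <;> cases c <;> cases d <;> rfl
  rw [hcomm]
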